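-- pv_equiv track=rewrite | github.com/Marblue0609/ImputePilot | ImputePilot/demo/ImputePilot_api/dataset_categories.py | order_categories
-- ===== SOURCE A (Python) =====
-- CATEGORY_ORDER = ["Climate", "Water", "Food/Spectro", "Motion", "Other"]
--
-- def order_categories(categories):
--     unique = [str(category) for category in categories if str(category).strip()]
--     seen = set()
--     deduped = []
--     for category in unique:
--         if category not in seen:
--             deduped.append(category)
--             seen.add(category)
--     preferred = [category for category in CATEGORY_ORDER if category in seen]
--     remaining = sorted(category for category in deduped if category not in CATEGORY_ORDER)
--     return preferred + remaining
-- ===== SOURCE B (Python) =====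
-- CATEGORY_ORDER = ["Climate", "Water", "Food/Spectro", "Motion", "Other"]
--
-- def order_categories(categories):
--     unique = {str(c) for c in categories if str(c).strip()}
--     return sorted(
--         unique,
--         key=lambda c: (CATEGORY_ORDER.index(c) if c in CATEGORY_ORDER else len(CATEGORY_ORDER), c),
--     )
-- ===== Notes on version B (the rewrite author's own statement) =====
-- stated objective: simpler
-- what changed: A's explicit seen/deduped dedup loop, the CATEGORY_ORDER partition pass and the separate sort of the leftovers followed by concatenation are replaced by deduplicating once into a set and one single sorted() call with a composite (rank-in-CATEGORY_ORDER-or-len, name) key.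
import Mathlib
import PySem

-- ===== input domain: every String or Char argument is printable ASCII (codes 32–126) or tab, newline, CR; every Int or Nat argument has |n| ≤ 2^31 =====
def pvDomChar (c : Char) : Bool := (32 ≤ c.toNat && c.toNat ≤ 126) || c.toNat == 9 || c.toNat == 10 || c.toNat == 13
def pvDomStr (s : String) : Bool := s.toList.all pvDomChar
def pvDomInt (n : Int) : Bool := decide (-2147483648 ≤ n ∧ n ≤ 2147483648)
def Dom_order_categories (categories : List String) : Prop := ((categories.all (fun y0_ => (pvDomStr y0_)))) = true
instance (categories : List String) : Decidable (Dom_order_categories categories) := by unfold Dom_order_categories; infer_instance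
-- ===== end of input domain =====

-- B replaces A's dedup-loop / partition / concatenation by one sorted() call over the
-- deduplicated set with a composite (rank, name) key; objective: simpler (same cost).

def CATEGORY_ORDER : List String := ["Climate", "Water", "Food/Spectro", "Motion", "Other"]

-- ===== PORT A =====
def order_categories (categories : List String) : List String :=
  -- unique = [str(c) for c in categories if str(c).strip()]  (str of a str is itself)
  let unique := (categories.filter (fun category => !(PySem.Str.strip category == ""))).map
    (fun category => category)
  -- the dedup loop over the pair of states (seen, deduped)
  let sd := unique.foldl
      (fun (st : PySem.Set String × List String) category =>
        if !(PySem.Set.contains st.1 category) then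
          (PySem.Set.add st.1 category, st.2 ++ [category])
        else st)
      (PySem.Set.empty, [])
  let preferred := CATEGORY_ORDER.filter (fun category => PySem.Set.contains sd.1 category)
  let remaining := PySem.List.sorted
      (sd.2.filter (fun category => !(CATEGORY_ORDER.contains category))) (fun x => x)
  preferred ++ remaining

-- ===== PORT B =====
-- key c = (CATEGORY_ORDER.index(c) if c in CATEGORY_ORDER else len(CATEGORY_ORDER), c):
-- index? CATEGORY_ORDER c is none exactly when c ∉ CATEGORY_ORDER (the guard's two branches)
def pvKey1 (c : String) : Int :=
  match PySem.List.index? CATEGORY_ORDER c with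
  | some i => (i : Int)
  | none => PySem.List.len CATEGORY_ORDER

def order_categories_alt (categories : List String) : List String :=
  let unique := PySem.Set.ofList
    ((categories.filter (fun c => !(PySem.Str.strip c == ""))).map (fun c => c))
  PySem.List.sorted2 unique pvKey1 (fun c => c)

-- ===== PRECONDITION & SPEC =====
def Spec_order_categories (categories : List String) (out : List String) : Prop := out = order_categories_alt categories
instance (categories : List String) (out : List String) : Decidable (Spec_order_categories categories out) := by unfold Spec_order_categories; infer_instance

-- ===== CLAIM (what is proved, stated in full; the proofs are below) =====
def Claim_equal_order_categories : Prop := ∀ (categories : List String), Dom_order_categories categories → Spec_order_categories categories (order_categories categories)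

-- ===== LEMMAS AND PROOFS =====

-- A's dedup loop: both components of the state stay equal and are the foldl of Set.add
lemma pair_foldl (xs : List String) : ∀ s : PySem.Set String,
    xs.foldl
      (fun (st : PySem.Set String × List String) category =>
        if !(PySem.Set.contains st.1 category) then
          (PySem.Set.add st.1 category, st.2 ++ [category])
        else st) (s, s)
    = (xs.foldl PySem.Set.add s, xs.foldl PySem.Set.add s) := by
  induction xs with
  | nil => intro s; rfl
  | cons x xs ih =>
    intro s
    simp only [List.foldl_cons]
    have hstep : (if !(PySem.Set.contains s x) then (PySem.Set.add s x, s ++ [x]) else (s, s))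
        = (PySem.Set.add s x, PySem.Set.add s x) := by
      by_cases h : x ∈ s
      · simp [PySem.Set.add, PySem.Set.contains, h]
      · simp [PySem.Set.add, PySem.Set.contains, h]
    rw [hstep, ih]

-- sorted with the tuple key (k1 c, c) is sorted with the lexicographic key
lemma sorted2_lex (xs : List String) (k1 : String → Int) :
    PySem.List.sorted2 xs k1 (fun c => c)
      = PySem.List.sorted xs (fun c => toLex (k1 c, c)) := by
  simp only [PySem.List.sorted2, PySem.List.sorted]
  congr 1
  funext acc x
  congr 1
  funext a b
  by_cases h1 : k1 a < k1 b
  · simp [h1, Prod.Lex.toLex_lt_toLex]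
  · by_cases h2 : k1 b < k1 a
    · simp [h1, h2, Prod.Lex.toLex_lt_toLex]
      omega
    · have he : k1 a = k1 b := le_antisymm (not_lt.1 h2) (not_lt.1 h1)
      simp [he, Prod.Lex.toLex_lt_toLex]

lemma CO_pairwise : CATEGORY_ORDER.Pairwise (fun a b => pvKey1 a < pvKey1 b) := by decide

lemma CO_nodup : CATEGORY_ORDER.Nodup := by decide

lemma mem_CO_key {a : String} (h : a ∈ CATEGORY_ORDER) : pvKey1 a < 5 := by
  fin_cases h <;> decide

lemma not_mem_CO_key {a : String} (h : a ∉ CATEGORY_ORDER) : pvKey1 a = 5 := by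
  simp only [pvKey1, (PySem.List.index?_eq_none_iff CATEGORY_ORDER a).2 h]
  rfl

-- core: A's preferred ++ sorted(remaining) IS the one lex-key sort of the dedup set
lemma main_eq (U : List String) :
    CATEGORY_ORDER.filter (fun c => PySem.Set.contains (PySem.Set.ofList U) c)
      ++ PySem.List.sorted ((PySem.Set.ofList U).filter (fun c => !(CATEGORY_ORDER.contains c)))
          (fun x => x)
    = PySem.List.sorted (PySem.Set.ofList U) (fun c => toLex (pvKey1 c, c)) := by
  set S : List String := PySem.Set.ofList U with hS
  set p : String → Bool := fun c => CATEGORY_ORDER.contains c with hp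
  have hSnodup : S.Nodup := PySem.Set.nodup_ofList U
  set P : List String := CATEGORY_ORDER.filter (fun c => PySem.Set.contains S c) with hP
  set F : List String := S.filter (fun c => !(p c)) with hF
  set R : List String := PySem.List.sorted F (fun x => x) with hR
  have hPmem : ∀ a, a ∈ P ↔ a ∈ CATEGORY_ORDER ∧ a ∈ S := by
    intro a
    simp [hP, List.mem_filter, PySem.Set.contains]
  have hRmem : ∀ a, a ∈ R → a ∈ S ∧ ¬ a ∈ CATEGORY_ORDER := by
    intro a ha
    rw [hR, PySem.List.mem_sorted, hF, List.mem_filter] at ha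
    exact ⟨ha.1, by simpa [hp, List.contains_iff_mem] using ha.2⟩
  refine (PySem.List.sorted_eq_of_perm_of_pairwise_lt S (P ++ R)
    (fun c => toLex (pvKey1 c, c)) ?_ ?_).symm
  · -- (P ++ R).Perm S
    have h1 : P.Perm (S.filter p) := by
      rw [List.perm_ext_iff_of_nodup (CO_nodup.filter _) (hSnodup.filter p)]
      intro a
      rw [hPmem, List.mem_filter]
      simp [hp, and_comm]
    have h2 : R.Perm F := PySem.List.sorted_perm F (fun x => x) false
    exact (h1.append h2).trans (List.filter_append_perm p S)
  · -- (P ++ R).Pairwise (strict lex key order)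
    rw [List.pairwise_append]
    refine ⟨?_, ?_, ?_⟩
    · have := List.Pairwise.sublist (List.filter_sublist (l := CATEGORY_ORDER)
        (p := fun c => PySem.Set.contains S c)) CO_pairwise
      exact this.imp (fun h => Prod.Lex.toLex_lt_toLex.2 (Or.inl h))
    · have h1 : R.Pairwise (fun a b => a ≤ b) := PySem.List.sorted_pairwise F (fun x => x)
      have h2 : R.Nodup := (PySem.List.sorted_perm F (fun x => x) false).symm.nodup
        (hSnodup.filter _)
      refine (h1.and h2).imp_of_mem ?_
      intro a b ha hb hab
      refine Prod.Lex.toLex_lt_toLex.2 (Or.inr ⟨?_, lt_of_le_of_ne hab.1 hab.2⟩)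
      simp [not_mem_CO_key (hRmem a ha).2, not_mem_CO_key (hRmem b hb).2]
    · intro a ha b hb
      refine Prod.Lex.toLex_lt_toLex.2 (Or.inl ?_)
      have h5 : pvKey1 a < 5 := mem_CO_key ((hPmem a).1 ha).1
      rw [not_mem_CO_key (hRmem b hb).2]
      simpa using h5

-- ===== VERDICT (by name: the statement is the Claim_ definition above) =====
theorem order_categories_spec : Claim_equal_order_categories := by
  intro categories _hdom
  unfold Spec_order_categories
  simp only [order_categories, order_categories_alt]
  rw [show (PySem.Set.empty : PySem.Set String) = ([] : List String) from rfl]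
  rw [pair_foldl, ← PySem.Set.ofList_eq_foldl, sorted2_lex]
  exact main_eq _
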